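-- pv_equiv track=rewrite | github.com/roumenis/KostkyKCD_OOP2 | main.py | score_counter
-- ===== SOURCE A (Python) =====
-- def score_counter(values):
--     score = 0
--     counts = {i: values.count(i) for i in range(1, 7)}
--
--     # Special combinations
--     if sorted(values) == [1, 2, 3, 4, 5, 6]:
--         return 1500
--     if sorted(values) == [2, 3, 4, 5, 6]:
--         return 750
--     if sorted(values) == [1, 2, 3, 4, 5]:
--         return 500
--
--     # Check for triples
--     for num in range(1, 7):
--         if counts[num] >= 3:
--             if num == 1:
--                 # 1×1×1 = 1000,
--                 triple_score = 1000
--             else: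
--                 # ex. 2×2×2 = 200
--                 triple_score = num * 100
--
--             # Counting multiplers (4 same = multipler, 5 same = 4×, 6 same = 8×)
--             multiplier = 2 ** (counts[num] - 3)  # 3 same → 1×, 4 same → 2×, 5 same → 4×...
--             score += triple_score * multiplier
--             counts[num] = 0
--
--     score += counts[1] * 100
--     score += counts[5] * 50
--
--     return score
-- ===== SOURCE B (Python) =====
-- def _run_score(v, c):
--     # score for one run of c equal dice showing face v
--     if c >= 3 and 1 <= v <= 6:
--         return (1000 if v == 1 else v * 100) * 2 ** (c - 3)
--     if v == 1:
--         return c * 100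
--     if v == 5:
--         return c * 50
--     return 0
--
--
-- def _score_runs(vs):
--     # vs is sorted: consume one run of equal values at a time
--     score = 0
--     i = 0
--     n = len(vs)
--     while i < n:
--         j = i + 1
--         while j < n and vs[j] == vs[i]:
--             j += 1
--         score += _run_score(vs[i], j - i)
--         i = j
--     return score
--
--
-- def score_counter(values):
--     vs = sorted(values)
--     if vs == [1, 2, 3, 4, 5, 6]:
--         return 1500
--     if vs == [2, 3, 4, 5, 6]:
--         return 750
--     if vs == [1, 2, 3, 4, 5]:
--         return 500
--     return _score_runs(vs)
-- ===== Notes on version B (the rewrite author's own statement) =====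
-- stated objective: alternative
-- what changed: B sorts once and scores by recursively consuming runs of equal values from the sorted list (run-length decomposition), with a per-run scoring function; it keeps no count dictionary at all, never calls values.count, and never mutates state, whereas A builds a six-entry count table with repeated count() scans and folds over faces 1..6 mutating that table.
import Mathlib
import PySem

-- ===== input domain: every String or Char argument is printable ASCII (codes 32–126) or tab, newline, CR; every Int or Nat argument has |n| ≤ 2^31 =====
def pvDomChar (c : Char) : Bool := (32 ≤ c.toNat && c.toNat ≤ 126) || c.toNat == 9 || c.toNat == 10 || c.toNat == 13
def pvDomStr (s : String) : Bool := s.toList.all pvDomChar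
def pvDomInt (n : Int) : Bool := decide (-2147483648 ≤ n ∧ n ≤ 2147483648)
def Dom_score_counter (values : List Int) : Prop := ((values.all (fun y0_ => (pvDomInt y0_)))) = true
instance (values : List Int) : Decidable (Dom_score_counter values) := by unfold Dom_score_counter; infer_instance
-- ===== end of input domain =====

-- B sorts once and scores by recursively consuming runs of equal values from the sorted
-- list with a per-run scoring function: no count table, no count() scans, no mutation.

-- ===== PORT A =====
def score_counter (values : List Int) : Int :=
  let counts : PySem.Dict Int Int :=
    (PySem.List.pyRange 1 7 1).foldl
      (fun d i => d.insert i (PySem.List.count values i : Int)) PySem.Dict.empty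
  if PySem.List.sorted values (fun x => x) false = [1, 2, 3, 4, 5, 6] then 1500
  else if PySem.List.sorted values (fun x => x) false = [2, 3, 4, 5, 6] then 750
  else if PySem.List.sorted values (fun x => x) false = [1, 2, 3, 4, 5] then 500
  else
    let st : Int × PySem.Dict Int Int :=
      (PySem.List.pyRange 1 7 1).foldl
        (fun st num =>
          if st.2.getD num 0 ≥ 3 then
            let triple_score : Int := if num = 1 then 1000 else num * 100
            let multiplier : Int := 2 ^ (st.2.getD num 0 - 3).toNat
            (st.1 + triple_score * multiplier, st.2.insert num 0)
          else st)
        (0, counts)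
    st.1 + st.2.getD 1 0 * 100 + st.2.getD 5 0 * 50

-- ===== PORT B =====
-- score for one run of c equal dice showing face v (port of _run_score)
def runScore (v : Int) (c : Int) : Int :=
  if 3 ≤ c ∧ 1 ≤ v ∧ v ≤ 6 then (if v = 1 then 1000 else v * 100) * 2 ^ (c - 3).toNat
  else if v = 1 then c * 100
  else if v = 5 then c * 50
  else 0

-- port of _score_runs: the outer while consumes one run per step — here recursion on the
-- remaining suffix; the inner while counting the run is takeWhile, advancing i is dropWhile
def scoreRuns : List Int → Int
  | [] => 0
  | v :: rest =>
    runScore v (1 + ((rest.takeWhile (fun x => x == v)).length : Int)) +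
      scoreRuns (rest.dropWhile (fun x => x == v))
termination_by l => l.length
decreasing_by
  simpa using Nat.lt_succ_of_le (List.length_dropWhile_le _ _)

def score_counter_alt (values : List Int) : Int :=
  let vs := PySem.List.sorted values (fun x => x) false
  if vs = [1, 2, 3, 4, 5, 6] then 1500
  else if vs = [2, 3, 4, 5, 6] then 750
  else if vs = [1, 2, 3, 4, 5] then 500
  else scoreRuns vs

-- ===== PRECONDITION & SPEC =====
def Spec_score_counter (values : List Int) (out : Int) : Prop := out = score_counter_alt values
instance (values : List Int) (out : Int) : Decidable (Spec_score_counter values out) := by unfold Spec_score_counter; infer_instance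

-- ===== CLAIM (what is proved, stated in full; the proofs are below) =====
def Claim_equal_score_counter : Prop := ∀ (values : List Int), Dom_score_counter values → Spec_score_counter values (score_counter values)

-- ===== LEMMAS AND PROOFS =====

-- in a sorted list v :: rest, every copy of v in rest sits in the leading run
theorem count_takeWhile_sorted (v : Int) (rest : List Int)
    (h : List.Pairwise (· ≤ ·) (v :: rest)) :
    (rest.count v : Int) = ((rest.takeWhile (fun x => x == v)).length : Int) := by
  induction rest with
  | nil => simp
  | cons w rs ih =>
    rcases List.pairwise_cons.mp h with ⟨hv, hw⟩
    by_cases hwv : w = v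
    · subst hwv
      have := ih hw
      simp [List.takeWhile] at this ⊢
      omega
    · have hvw : v < w := lt_of_le_of_ne (hv w (by simp)) (fun e => hwv e.symm)
      have hnot : v ∉ w :: rs := by
        intro hmem
        rcases List.mem_cons.mp hmem with h1 | h2
        · exact hwv h1.symm
        · have := (List.pairwise_cons.mp hw).1 v h2
          omega
      have hz : (w :: rs).count v = 0 := List.count_eq_zero.mpr hnot
      have hb : (w == v) = false := by simp [hwv]
      simp [hz, List.takeWhile, hb]

theorem count_dropWhile_self (v : Int) (rest : List Int)
    (h : List.Pairwise (· ≤ ·) (v :: rest)) :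
    (rest.dropWhile (fun x => x == v)).count v = 0 := by
  have hcnt : rest.count v =
      (rest.takeWhile (fun x => x == v)).count v + (rest.dropWhile (fun x => x == v)).count v := by
    conv_lhs => rw [← List.takeWhile_append_dropWhile (p := fun x => x == v) (l := rest)]
    exact List.count_append ..
  have htw : (rest.takeWhile (fun x => x == v)).count v
      = (rest.takeWhile (fun x => x == v)).length := by
    apply List.count_eq_length.mpr
    intro x hx
    have hb := List.mem_takeWhile_imp hx
    exact (eq_of_beq hb).symm
  have hle := count_takeWhile_sorted v rest h
  omega

theorem count_dropWhile_other (v w : Int) (rest : List Int) (hne : w ≠ v) :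
    (rest.dropWhile (fun x => x == v)).count w = rest.count w := by
  have hcnt : rest.count w =
      (rest.takeWhile (fun x => x == v)).count w + (rest.dropWhile (fun x => x == v)).count w := by
    conv_lhs => rw [← List.takeWhile_append_dropWhile (p := fun x => x == v) (l := rest)]
    exact List.count_append ..
  have htw : (rest.takeWhile (fun x => x == v)).count w = 0 := by
    apply List.count_eq_zero.mpr
    intro hmem
    have := List.mem_takeWhile_imp hmem
    simp at this
    exact hne this
  omega

theorem runScore_zero (w : Int) : runScore w 0 = 0 := by
  have h30 : ¬ (3:Int) ≤ 0 := by norm_num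
  simp only [runScore]
  rw [if_neg (fun hh => h30 hh.1)]
  split_ifs <;> simp

theorem scoreRuns_eq_aux (n : Nat) : ∀ l : List Int, l.length = n →
    List.Pairwise (· ≤ ·) l →
    scoreRuns l =
      runScore 1 (l.count 1 : Int) + runScore 2 (l.count 2 : Int) +
      runScore 3 (l.count 3 : Int) + runScore 4 (l.count 4 : Int) +
      runScore 5 (l.count 5 : Int) + runScore 6 (l.count 6 : Int) := by
  induction n using Nat.strong_induction_on with
  | _ n ih =>
    intro l hn h
    cases l with
    | nil => simp [scoreRuns, runScore_zero]
    | cons v rest =>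
      have hsub : (rest.dropWhile (fun x => x == v)).Sublist (v :: rest) :=
        (List.dropWhile_sublist _).trans (List.sublist_cons_self _ _)
      have hrest' : List.Pairwise (· ≤ ·) (rest.dropWhile (fun x => x == v)) :=
        h.sublist hsub
      have hstep : scoreRuns (v :: rest) =
          runScore v (1 + ((rest.takeWhile (fun x => x == v)).length : Int)) +
          scoreRuns (rest.dropWhile (fun x => x == v)) := by
        rw [scoreRuns]
      have hc : (1 + ((rest.takeWhile (fun x => x == v)).length : Int))
          = ((v :: rest).count v : Int) := by
        have := count_takeWhile_sorted v rest h
        simp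
        omega

      have hlen : (rest.dropWhile (fun x => x == v)).length < n := by
        have := List.length_dropWhile_le (p := fun x => x == v) (l := rest)
        simp at hn
        omega
      have hIH := ih _ hlen (rest.dropWhile (fun x => x == v)) rfl hrest'
      have h0 := count_dropWhile_self v rest h
      rw [hstep, hc, hIH]
      by_cases h1 : v = 1
      · subst h1
        rw [h0, count_dropWhile_other 1 2 rest (by omega), count_dropWhile_other 1 3 rest (by omega),
            count_dropWhile_other 1 4 rest (by omega), count_dropWhile_other 1 5 rest (by omega),
            count_dropWhile_other 1 6 rest (by omega)]
        simp [runScore_zero]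
        ring
      · by_cases h2 : v = 2
        · subst h2
          rw [h0, count_dropWhile_other 2 1 rest (by omega), count_dropWhile_other 2 3 rest (by omega),
              count_dropWhile_other 2 4 rest (by omega), count_dropWhile_other 2 5 rest (by omega),
              count_dropWhile_other 2 6 rest (by omega)]
          simp [runScore_zero]
          ring
        · by_cases h3 : v = 3
          · subst h3
            rw [h0, count_dropWhile_other 3 1 rest (by omega), count_dropWhile_other 3 2 rest (by omega),
                count_dropWhile_other 3 4 rest (by omega), count_dropWhile_other 3 5 rest (by omega),
                count_dropWhile_other 3 6 rest (by omega)]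
            simp [runScore_zero]
            ring
          · by_cases h4 : v = 4
            · subst h4
              rw [h0, count_dropWhile_other 4 1 rest (by omega), count_dropWhile_other 4 2 rest (by omega),
                  count_dropWhile_other 4 3 rest (by omega), count_dropWhile_other 4 5 rest (by omega),
                  count_dropWhile_other 4 6 rest (by omega)]
              simp [runScore_zero]
              ring
            · by_cases h5 : v = 5
              · subst h5
                rw [h0, count_dropWhile_other 5 1 rest (by omega), count_dropWhile_other 5 2 rest (by omega),
                    count_dropWhile_other 5 3 rest (by omega), count_dropWhile_other 5 4 rest (by omega),
                    count_dropWhile_other 5 6 rest (by omega)]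
                simp [runScore_zero]
                ring
              · by_cases h6 : v = 6
                · subst h6
                  rw [h0, count_dropWhile_other 6 1 rest (by omega), count_dropWhile_other 6 2 rest (by omega),
                      count_dropWhile_other 6 3 rest (by omega), count_dropWhile_other 6 4 rest (by omega),
                      count_dropWhile_other 6 5 rest (by omega)]
                  simp [runScore_zero]
                  ring
                · -- v is not a die face: its run scores 0 and no face count changes
                  have hout : ¬(1 ≤ v ∧ v ≤ 6) := by omega
                  have hv0 : runScore v (((v :: rest).count v : Nat) : Int) = 0 := by
                    simp only [runScore]
                    rw [if_neg (fun hh => hout ⟨hh.2.1, hh.2.2⟩), if_neg h1, if_neg h5]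
                  rw [hv0, count_dropWhile_other v 1 rest (Ne.symm h1),
                      count_dropWhile_other v 2 rest (Ne.symm h2),
                      count_dropWhile_other v 3 rest (Ne.symm h3),
                      count_dropWhile_other v 4 rest (Ne.symm h4),
                      count_dropWhile_other v 5 rest (Ne.symm h5),
                      count_dropWhile_other v 6 rest (Ne.symm h6)]
                  simp [h1, h2, h3, h4, h5, h6]

theorem scoreRuns_eq (l : List Int) (h : List.Pairwise (· ≤ ·) l) :
    scoreRuns l =
      runScore 1 (l.count 1 : Int) + runScore 2 (l.count 2 : Int) +
      runScore 3 (l.count 3 : Int) + runScore 4 (l.count 4 : Int) +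
      runScore 5 (l.count 5 : Int) + runScore 6 (l.count 6 : Int) :=
  scoreRuns_eq_aux l.length l rfl h

set_option maxHeartbeats 4000000 in
theorem score_counter_eq (values : List Int) :
    score_counter values = score_counter_alt values := by
  have hr167 : PySem.List.pyRange 1 7 1 = [1, 2, 3, 4, 5, 6] := by decide
  have hpw : List.Pairwise (· ≤ ·) (PySem.List.sorted values (fun x => x) false) := by
    simpa using PySem.List.sorted_pairwise values (fun x => x)
  have hcnt : ∀ w : Int, (PySem.List.sorted values (fun x => x) false).count w
      = values.count w := fun w => (PySem.List.sorted_perm values (fun x => x) false).count_eq w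
  simp only [score_counter, score_counter_alt, hr167, scoreRuns_eq _ hpw, hcnt]
  by_cases hS1 : PySem.List.sorted values (fun x => x) false = [1, 2, 3, 4, 5, 6]
  · simp only [if_pos hS1]
  by_cases hS2 : PySem.List.sorted values (fun x => x) false = [2, 3, 4, 5, 6]
  · simp only [if_neg hS1, if_pos hS2]
  by_cases hS3 : PySem.List.sorted values (fun x => x) false = [1, 2, 3, 4, 5]
  · simp only [if_neg hS1, if_neg hS2, if_pos hS3]
  simp only [if_neg hS1, if_neg hS2, if_neg hS3]
  by_cases h1 : 3 ≤ List.count (1:Int) values <;>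
  by_cases h2 : 3 ≤ List.count (2:Int) values <;>
  by_cases h3 : 3 ≤ List.count (3:Int) values <;>
  by_cases h4 : 3 ≤ List.count (4:Int) values <;>
  by_cases h5 : 3 ≤ List.count (5:Int) values <;>
  by_cases h6 : 3 ≤ List.count (6:Int) values <;>
  simp [h1, h2, h3, h4, h5, h6, runScore, List.foldl_cons, List.foldl_nil,
    PySem.Dict.getD_insert, PySem.List.count_eq] <;>
  ring

-- ===== VERDICT (by name: the statement is the Claim_ definition above) =====
theorem score_counter_spec : Claim_equal_score_counter := by
  intro values _
  unfold Spec_score_counter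
  exact score_counter_eq values
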